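-- pv_equiv track=rewrite | github.com/kimgun95/my-study-log | 2022_Kakao_Intern/1.py | solution
-- ===== SOURCE A (Python) =====
-- def solution(survey, choices):
--     dict = {
--         'R' : 0,
--         'T' : 0,
--         'C' : 0,
--         'F' : 0,
--         'J' : 0,
--         'M' : 0,
--         'A' : 0,
--         'N' : 0
--     }
--     for i in range(len(survey)):
--         if choices[i] == 1:
--             dict[survey[i][0]] += 3
--         elif choices[i] == 2:
--             dict[survey[i][0]] += 2
--         elif choices[i] == 3:
--             dict[survey[i][0]] += 1
--         elif choices[i] == 5:
--             dict[survey[i][1]] += 1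
--         elif choices[i] == 6:
--             dict[survey[i][1]] += 2
--         elif choices[i] == 7:
--             dict[survey[i][1]] += 3
--
--     answer = ''
--     if dict['R'] >= dict['T']:
--         answer += 'R'
--     else:
--         answer += 'T'
--     if dict['C'] >= dict['F']:
--         answer += 'C'
--     else:
--         answer += 'F'
--     if dict['J'] >= dict['M']:
--         answer += 'J'
--     else:
--         answer += 'M'
--     if dict['A'] >= dict['N']:
--         answer += 'A'
--     else:
--         answer += 'N'
--     return answer
-- ===== SOURCE B (Python) =====
-- def solution(survey, choices):
--     def score(letter):
--         total = 0
--         for i, s in enumerate(survey):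
--             c = choices[i]
--             if 1 <= c <= 3 and s[0] == letter:
--                 total += 4 - c
--             elif 5 <= c <= 7 and s[1] == letter:
--                 total += c - 4
--         return total
--     return ''.join(a if score(a) >= score(b) else b
--                    for a, b in ('RT', 'CF', 'JM', 'AN'))
-- ===== Notes on version B (the rewrite author's own statement) =====
-- stated objective: alternative
-- what changed: B has no dict and no running counters over the input: it computes an independent score(letter) pass per letter (grouping the work by letter instead of by answer), then builds the result by comparing the two scores of each category; A makes one pass updating eight dict counters through a six-way elif chain.
import Mathlib
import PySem

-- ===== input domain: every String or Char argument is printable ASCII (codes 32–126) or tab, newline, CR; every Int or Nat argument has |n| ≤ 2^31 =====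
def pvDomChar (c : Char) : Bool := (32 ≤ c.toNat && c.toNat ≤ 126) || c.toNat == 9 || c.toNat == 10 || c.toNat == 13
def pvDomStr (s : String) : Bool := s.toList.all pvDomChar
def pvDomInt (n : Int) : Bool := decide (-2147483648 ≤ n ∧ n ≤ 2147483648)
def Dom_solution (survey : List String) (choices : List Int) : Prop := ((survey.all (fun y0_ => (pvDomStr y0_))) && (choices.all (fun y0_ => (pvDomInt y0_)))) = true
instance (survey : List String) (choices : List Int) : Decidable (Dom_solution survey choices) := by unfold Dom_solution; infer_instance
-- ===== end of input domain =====

-- B replaces A's one dict-updating pass by an independent per-letter score() pass for each of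
-- the eight letters, picking each output letter by comparing the two scores of its category
-- (objective: alternative decomposition, same asymptotic cost).


-- ===== PORT A =====
-- A's initial dict {'R':0, …, 'N':0} (keys are the 1-char strings, ported as Char)
def pvDict0 : PySem.Dict Char Int :=
  PySem.Dict.ofList [('R',0),('T',0),('C',0),('F',0),('J',0),('M',0),('A',0),('N',0)]

-- survey[i][j]; default ' ' is never used inside Pre_ (Python raises there)
def pvKey (survey : List String) (i j : Int) : Char :=
  (PySem.Str.pyGet? (PySem.List.pyGetD survey i "") j).getD ' '

-- one iteration of A's for-loop (dict[k] += w ported as modify; key present under Pre_)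
def pvStepA (survey : List String) (choices : List Int) (d : PySem.Dict Char Int) (i : Int) :
    PySem.Dict Char Int :=
  let c := PySem.List.pyGetD choices i 0
  if c = 1 then d.modify (pvKey survey i 0) 0 (· + 3)
  else if c = 2 then d.modify (pvKey survey i 0) 0 (· + 2)
  else if c = 3 then d.modify (pvKey survey i 0) 0 (· + 1)
  else if c = 5 then d.modify (pvKey survey i 1) 0 (· + 1)
  else if c = 6 then d.modify (pvKey survey i 1) 0 (· + 2)
  else if c = 7 then d.modify (pvKey survey i 1) 0 (· + 3)
  else d

def solution (survey : List String) (choices : List Int) : String :=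
  let d := (PySem.List.pyRange 0 (survey.length : Int) 1).foldl (pvStepA survey choices) pvDict0
  String.ofList [ (if d.getD 'R' 0 ≥ d.getD 'T' 0 then 'R' else 'T')
            , (if d.getD 'C' 0 ≥ d.getD 'F' 0 then 'C' else 'F')
            , (if d.getD 'J' 0 ≥ d.getD 'M' 0 then 'J' else 'M')
            , (if d.getD 'A' 0 ≥ d.getD 'N' 0 then 'A' else 'N') ]

-- ===== PORT B =====
-- one iteration of B's score() loop over enumerate(survey) reading choices[i]
-- (s[0]/s[1] default ' ' is never reached inside Pre_, where Python raises)
def pvScoreStep (choices : List Int) (L : Char) (t : Int) (p : Int × String) : Int :=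
  let c := PySem.List.pyGetD choices p.1 0
  if 1 ≤ c ∧ c ≤ 3 ∧ ((PySem.Str.pyGet? p.2 0).getD ' ') = L then t + (4 - c)
  else if 5 ≤ c ∧ c ≤ 7 ∧ ((PySem.Str.pyGet? p.2 1).getD ' ') = L then t + (c - 4)
  else t

-- B's score(letter): one full pass over the survey for that letter
def pvScore (survey : List String) (choices : List Int) (L : Char) : Int :=
  (PySem.List.enumerate survey).foldl (pvScoreStep choices L) 0

def solution_alt (survey : List String) (choices : List Int) : String :=
  String.ofList (([('R','T'),('C','F'),('J','M'),('A','N')]).map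
    (fun p => if pvScore survey choices p.1 ≥ pvScore survey choices p.2 then p.1 else p.2))

-- ===== PRECONDITION & SPEC =====
-- a zipped pair (s, c) on which A's loop body returns normally: whenever a branch reads a
-- character of s, that character exists and is one of the eight dict keys
def pvWF (p : String × Int) : Prop :=
  (1 ≤ p.2 ∧ p.2 ≤ 3 → PySem.Chars.pyGet? p.1.toList 0 ∈
      ([some 'R', some 'T', some 'C', some 'F', some 'J', some 'M', some 'A', some 'N'] : List (Option Char))) ∧
  (5 ≤ p.2 ∧ p.2 ≤ 7 → PySem.Chars.pyGet? p.1.toList 1 ∈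
      ([some 'R', some 'T', some 'C', some 'F', some 'J', some 'M', some 'A', some 'N'] : List (Option Char)))

-- Pre_ = exactly the inputs where Python A returns: choices covers every survey index
-- (else IndexError on choices[i]) and every reached character access hits a dict key
-- (else IndexError on a short string / KeyError on a foreign letter)
def Pre_solution (survey : List String) (choices : List Int) : Prop :=
  survey.length ≤ choices.length ∧ ∀ p ∈ survey.zip choices, pvWF p
instance (survey : List String) (choices : List Int) : Decidable (Pre_solution survey choices) := by
  unfold Pre_solution pvWF; infer_instance

def pvWitness_solution : List String × List Int :=
  (["RT", "CF", "JM", "AN"], [1, 7, 4, 5])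

def Spec_solution (survey : List String) (choices : List Int) (out : String) : Prop := out = solution_alt survey choices
instance (survey : List String) (choices : List Int) (out : String) : Decidable (Spec_solution survey choices out) := by unfold Spec_solution; infer_instance

-- ===== CLAIM (what is proved, stated in full; the proofs are below) =====
def Claim_equal_solution : Prop := ∀ (survey : List String) (choices : List Int), Dom_solution survey choices → Pre_solution survey choices → Spec_solution survey choices (solution survey choices)

-- ===== LEMMAS AND PROOFS =====

-- A's loop body, rephrased on the zipped pair it actually reads
def pvStepA2 (d : PySem.Dict Char Int) (p : String × Int) : PySem.Dict Char Int :=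
  if p.2 = 1 then d.modify ((PySem.Str.pyGet? p.1 0).getD ' ') 0 (· + 3)
  else if p.2 = 2 then d.modify ((PySem.Str.pyGet? p.1 0).getD ' ') 0 (· + 2)
  else if p.2 = 3 then d.modify ((PySem.Str.pyGet? p.1 0).getD ' ') 0 (· + 1)
  else if p.2 = 5 then d.modify ((PySem.Str.pyGet? p.1 1).getD ' ') 0 (· + 1)
  else if p.2 = 6 then d.modify ((PySem.Str.pyGet? p.1 1).getD ' ') 0 (· + 2)
  else if p.2 = 7 then d.modify ((PySem.Str.pyGet? p.1 1).getD ' ') 0 (· + 3)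
  else d

-- the per-pair contribution B's score(letter) counts, recursively over the zipped lists
def pvScoreZ (L : Char) : List (String × Int) → Int
  | [] => 0
  | p :: zl =>
      (if 1 ≤ p.2 ∧ p.2 ≤ 3 ∧ ((PySem.Str.pyGet? p.1 0).getD ' ') = L then 4 - p.2
       else if 5 ≤ p.2 ∧ p.2 ≤ 7 ∧ ((PySem.Str.pyGet? p.1 1).getD ' ') = L then p.2 - 4
       else 0) + pvScoreZ L zl

lemma pvStepA_nil (l1 : List String) (d : PySem.Dict Char Int) (i : Int) :
    pvStepA l1 [] d i = d := by
  simp [pvStepA, PySem.List.pyGetD, PySem.List.pyGet?]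

lemma pvFoldl_const {α σ : Type} (f : σ → α → σ) (h : ∀ d x, f d x = d) :
    ∀ (l : List α) (init : σ), l.foldl f init = init := by
  intro l; induction l with
  | nil => intro init; rfl
  | cons x l ih => intro init; rw [List.foldl_cons, h, ih]

lemma pvStepA_zero (s : String) (c : Int) (l1 : List String) (l2 : List Int)
    (d : PySem.Dict Char Int) :
    pvStepA (s :: l1) (c :: l2) d 0 = pvStepA2 d (s, c) := by
  simp [pvStepA, pvStepA2, pvKey]

lemma pvGetD_cons_succ {α : Type} (x : α) (xs : List α) (k : Nat) (dflt : α) :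
    PySem.List.pyGetD (x :: xs) ((k : Int) + 1) dflt = PySem.List.pyGetD xs (k : Int) dflt := by
  have h : ((k : Int) + 1) = ((k + 1 : Nat) : Int) := by push_cast; ring
  rw [h, PySem.List.pyGetD_natCast, PySem.List.pyGetD_natCast, List.getD_cons_succ]

lemma pvGetD_cons_zero {α : Type} (x : α) (xs : List α) (dflt : α) :
    PySem.List.pyGetD (x :: xs) 0 dflt = x := by
  have h : ((0 : Nat) : Int) = 0 := rfl
  rw [← h, PySem.List.pyGetD_natCast]; rfl

lemma pvStepA_succ (s : String) (c : Int) (l1 : List String) (l2 : List Int)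
    (d : PySem.Dict Char Int) (k : Nat) :
    pvStepA (s :: l1) (c :: l2) d ((k : Int) + 1) = pvStepA l1 l2 d (k : Int) := by
  simp only [pvStepA, pvKey, pvGetD_cons_succ]

-- bridge: A's index loop over range(len(survey)) is a fold over zip(survey, choices)
-- (even without a length hypothesis: a missing choices[i] defaults to 0, the else branch)
lemma pvFoldA_zip :
    ∀ (l1 : List String) (l2 : List Int) (d : PySem.Dict Char Int),
      (PySem.List.pyRange 0 (l1.length : Int) 1).foldl (pvStepA l1 l2) d
        = (l1.zip l2).foldl pvStepA2 d := by
  intro l1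
  induction l1 with
  | nil => intro l2 d; simp
  | cons s l1 ih =>
    intro l2 d
    cases l2 with
    | nil =>
      simp only [List.zip_nil_right, List.foldl_nil]
      exact pvFoldl_const _ (pvStepA_nil (s :: l1)) _ d
    | cons c l2 =>
      rw [PySem.List.pyRange_zero_nat, List.length_cons, List.range_succ_eq_map,
          List.map_cons, List.foldl_cons, List.map_map, List.foldl_map]
      have h0 : pvStepA (s :: l1) (c :: l2) d ((0 : Nat) : Int) = pvStepA2 d (s, c) := by
        exact_mod_cast pvStepA_zero s c l1 l2 d
      rw [h0]
      simp only [Function.comp, Nat.succ_eq_add_one, Nat.cast_add, Nat.cast_one, pvStepA_succ]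
      have h := ih l2 (pvStepA2 d (s, c))
      rw [PySem.List.pyRange_zero_nat, List.foldl_map] at h
      simpa using h

-- one step of B's score loop past the head of choices ignores that head
lemma pvScoreStep_succ (c : Int) (l2 : List Int) (L : Char) (t : Int) (k : Nat) (s : String) :
    pvScoreStep (c :: l2) L t ((k : Int) + 1, s) = pvScoreStep l2 L t ((k : Int), s) := by
  simp only [pvScoreStep, pvGetD_cons_succ]

lemma pvScoreStep_nil (L : Char) (t : Int) (p : Int × String) :
    pvScoreStep [] L t p = t := by
  simp [pvScoreStep, PySem.List.pyGetD, PySem.List.pyGet?]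

-- shifting the enumeration start by one matches dropping the head of choices
lemma pvScore_shift (L : Char) (c : Int) :
    ∀ (l1 : List String) (l2 : List Int) (k : Nat) (t : Int),
      (PySem.List.enumerate l1 ((k : Int) + 1)).foldl (pvScoreStep (c :: l2) L) t
        = (PySem.List.enumerate l1 (k : Int)).foldl (pvScoreStep l2 L) t := by
  intro l1
  induction l1 with
  | nil => intro l2 k t; simp [PySem.List.enumerate_nil]
  | cons s l1 ih =>
    intro l2 k t
    rw [PySem.List.enumerate_cons, PySem.List.enumerate_cons, List.foldl_cons, List.foldl_cons,
        pvScoreStep_succ]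
    have hcast : ((k : Int) + 1 + 1) = (((k + 1 : Nat) : Int) + 1) := by push_cast; ring
    have hcast2 : ((k : Int) + 1) = (((k + 1 : Nat) : Int)) := by push_cast; ring
    rw [hcast, ih, hcast2]

-- B's score(letter) fold over enumerate(survey) counts pvScoreZ over zip(survey, choices)
lemma pvScore_zip (L : Char) :
    ∀ (l1 : List String) (l2 : List Int) (t : Int),
      (PySem.List.enumerate l1 0).foldl (pvScoreStep l2 L) t = t + pvScoreZ L (l1.zip l2) := by
  intro l1
  induction l1 with
  | nil => intro l2 t; simp [PySem.List.enumerate_nil, pvScoreZ]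
  | cons s l1 ih =>
    intro l2 t
    cases l2 with
    | nil =>
      simp only [List.zip_nil_right, pvScoreZ, Int.add_zero]
      exact pvFoldl_const _ (fun t p => pvScoreStep_nil L t p) _ t
    | cons c l2 =>
      rw [PySem.List.enumerate_cons, List.foldl_cons]
      have h0 : ((0 : Int) + 1) = (((0 : Nat) : Int) + 1) := by norm_num
      rw [h0, pvScore_shift, Nat.cast_zero, ih]
      have hstep : pvScoreStep (c :: l2) L t (0, s)
          = t + (if 1 ≤ c ∧ c ≤ 3 ∧ ((PySem.Str.pyGet? s 0).getD ' ') = L then 4 - c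
                 else if 5 ≤ c ∧ c ≤ 7 ∧ ((PySem.Str.pyGet? s 1).getD ' ') = L then c - 4
                 else 0) := by
        simp only [pvScoreStep, pvGetD_cons_zero]
        split_ifs <;> ring
      rw [hstep]
      simp only [List.zip_cons_cons, pvScoreZ]
      ring

-- the dict entry for L after one dict[k] += w update
lemma pvModify_getD (d : PySem.Dict Char Int) (ch L : Char) (w : Int) :
    (d.modify ch 0 (· + w)).getD L 0 = d.getD L 0 + (if ch = L then w else 0) := by
  rcases eq_or_ne L ch with h | h
  · subst h; simp [PySem.Dict.getD_modify_self]
  · rw [PySem.Dict.getD_modify, if_neg h, if_neg (Ne.symm h)]; ring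

-- the dict entry for L after one step of A's loop gains B's per-letter contribution
lemma pvStepA2_getD (d : PySem.Dict Char Int) (s : String) (c : Int) (L : Char) :
    (pvStepA2 d (s, c)).getD L 0 = d.getD L 0 +
      (if 1 ≤ c ∧ c ≤ 3 ∧ ((PySem.Str.pyGet? s 0).getD ' ') = L then 4 - c
       else if 5 ≤ c ∧ c ≤ 7 ∧ ((PySem.Str.pyGet? s 1).getD ' ') = L then c - 4
       else 0) := by
  by_cases h1 : c = 1
  · subst h1
    have h : pvStepA2 d (s, 1) = d.modify ((PySem.Str.pyGet? s 0).getD ' ') 0 (· + 3) := by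
      simp [pvStepA2]
    rw [h, pvModify_getD]
    simp
  by_cases h2 : c = 2
  · subst h2
    have h : pvStepA2 d (s, 2) = d.modify ((PySem.Str.pyGet? s 0).getD ' ') 0 (· + 2) := by
      simp [pvStepA2]
    rw [h, pvModify_getD]
    simp
  by_cases h3 : c = 3
  · subst h3
    have h : pvStepA2 d (s, 3) = d.modify ((PySem.Str.pyGet? s 0).getD ' ') 0 (· + 1) := by
      simp [pvStepA2]
    rw [h, pvModify_getD]
    simp
  by_cases h5 : c = 5
  · subst h5
    have h : pvStepA2 d (s, 5) = d.modify ((PySem.Str.pyGet? s 1).getD ' ') 0 (· + 1) := by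
      simp [pvStepA2]
    rw [h, pvModify_getD]
    simp
  by_cases h6 : c = 6
  · subst h6
    have h : pvStepA2 d (s, 6) = d.modify ((PySem.Str.pyGet? s 1).getD ' ') 0 (· + 2) := by
      simp [pvStepA2]
    rw [h, pvModify_getD]
    simp
  by_cases h7 : c = 7
  · subst h7
    have h : pvStepA2 d (s, 7) = d.modify ((PySem.Str.pyGet? s 1).getD ' ') 0 (· + 3) := by
      simp [pvStepA2]
    rw [h, pvModify_getD]
    simp
  have h : pvStepA2 d (s, c) = d := by
    simp [pvStepA2, h1, h2, h3, h5, h6, h7]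
  rw [h, if_neg (fun hx => by omega), if_neg (fun hx => by omega)]
  ring

-- main invariant: A's dict entry for L is its initial value plus B's per-letter count
lemma pvMain (L : Char) :
    ∀ (zl : List (String × Int)) (d : PySem.Dict Char Int),
      (zl.foldl pvStepA2 d).getD L 0 = d.getD L 0 + pvScoreZ L zl := by
  intro zl
  induction zl with
  | nil => intro d; simp [pvScoreZ]
  | cons p zl ih =>
    obtain ⟨s, c⟩ := p
    intro d
    rw [List.foldl_cons, ih, pvStepA2_getD]
    simp only [pvScoreZ]
    ring

-- A's dict entry equals B's score for every one of the eight letters (initial value 0)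
lemma pvEntry_eq_score (survey : List String) (choices : List Int) (L : Char)
    (h0 : pvDict0.getD L 0 = 0) :
    ((PySem.List.pyRange 0 (survey.length : Int) 1).foldl (pvStepA survey choices) pvDict0).getD L 0
      = pvScore survey choices L := by
  rw [pvFoldA_zip, pvMain, h0, pvScore, pvScore_zip]

-- ===== VERDICT (by name: the statement is the Claim_ definition above) =====
theorem solution_spec : Claim_equal_solution := by
  intro survey choices _ _
  unfold Spec_solution
  simp only [solution, solution_alt]
  rw [pvEntry_eq_score survey choices 'R' (by decide),
      pvEntry_eq_score survey choices 'T' (by decide),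
      pvEntry_eq_score survey choices 'C' (by decide),
      pvEntry_eq_score survey choices 'F' (by decide),
      pvEntry_eq_score survey choices 'J' (by decide),
      pvEntry_eq_score survey choices 'M' (by decide),
      pvEntry_eq_score survey choices 'A' (by decide),
      pvEntry_eq_score survey choices 'N' (by decide)]
  simp
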